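-- pv_equiv track=rewrite | github.com/SergejGleithmann/aoc | 2025/day09/src/movietheater.py | part2
-- ===== SOURCE A (Python) =====
-- def getrect(a: int, b: int) -> tuple[tuple[int, int], tuple[int, int]]:
--     return (min(a[0], b[0]), max(a[0], b[0])), (min(a[1], b[1]), max(a[1], b[1]))
--
-- def check_rec(
--     pair: tuple[tuple[int, int], tuple[int, int]], border: list[tuple[int, int]]
-- ) -> bool:
--     (rxmin, rxmax), (rymin, rymax) = getrect(*pair)
--     for i in range(-1, len(border)):
--         x1, y1 = border[i - 1]
--         x2, y2 = border[i]
--         if (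
--             rxmin < max(x1, x2)
--             and rxmax > min(x1, x2)
--             and rymin < min(y1, y2)
--             and rymax > max(y1, y2)
--         ):
--             return False
--     return True
--
-- def area(a: int, b: int) -> int:
--     return (abs(a[0] - b[0]) + 1) * (abs(a[1] - b[1]) + 1)
--
-- def part2(points: list[tuple[int, int]]) -> int:
--     max_area = 0
--     pairs = [(a, b) for a in points for b in points if a != b]
--     for pair in pairs:
--         temp_area = area(*pair)
--         if temp_area > max_area:
--             if check_rec(pair, points):
--                 max_area = max(area(*pair), max_area)
--     return max_area
-- ===== SOURCE B (Python) =====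
-- def part2(points):
--     def area(a, b):
--         return (abs(a[0] - b[0]) + 1) * (abs(a[1] - b[1]) + 1)
--
--     edges = list(zip(points, points[1:] + points[:1]))
--
--     def ok(a, b):
--         rxmin, rxmax = min(a[0], b[0]), max(a[0], b[0])
--         rymin, rymax = min(a[1], b[1]), max(a[1], b[1])
--         for (x1, y1), (x2, y2) in edges:
--             if (
--                 rxmin < max(x1, x2)
--                 and rxmax > min(x1, x2)
--                 and rymin < min(y1, y2)
--                 and rymax > max(y1, y2)
--             ):
--                 return False
--         return True
--
--     pairs = [(a, b) for a in points for b in points if a != b]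
--     pairs.sort(key=lambda p: area(p[0], p[1]), reverse=True)
--     for a, b in pairs:
--         if ok(a, b):
--             return area(a, b)
--     return 0
-- ===== Notes on version B (the rewrite author's own statement) =====
-- stated objective: alternative
-- what changed: A scans all ordered pairs keeping a running maximum and re-checks the border for every pair beating it; B sorts the pairs by area descending once and returns the area of the first pair whose rectangle passes the border check (early exit).
import Mathlib
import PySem

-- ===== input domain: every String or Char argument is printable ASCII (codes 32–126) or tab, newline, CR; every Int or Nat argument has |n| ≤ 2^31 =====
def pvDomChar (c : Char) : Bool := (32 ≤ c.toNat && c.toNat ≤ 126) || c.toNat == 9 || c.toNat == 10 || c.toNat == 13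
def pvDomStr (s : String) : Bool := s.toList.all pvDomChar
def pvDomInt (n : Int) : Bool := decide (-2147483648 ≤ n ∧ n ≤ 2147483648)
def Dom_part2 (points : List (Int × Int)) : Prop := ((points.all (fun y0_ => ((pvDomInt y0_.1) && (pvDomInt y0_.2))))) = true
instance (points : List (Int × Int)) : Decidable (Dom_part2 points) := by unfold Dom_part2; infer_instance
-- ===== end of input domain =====

-- B replaces A's pruned quadratic scan by: sort the pairs by area descending, return the area of the
-- first pair whose rectangle does not cross the border (early exit).  Objective: alternative algorithm.

-- the border-crossing test shared verbatim by both Pythons (the 4-conjunct condition in the loop body)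
def crossEdge (rx ry p1 p2 : Int × Int) : Bool :=
  decide (rx.1 < max p1.1 p2.1) && decide (rx.2 > min p1.1 p2.1) &&
  decide (ry.1 < min p1.2 p2.2) && decide (ry.2 > max p1.2 p2.2)

-- ===== PORT A =====
def getrect (a b : Int × Int) : (Int × Int) × (Int × Int) :=
  ((min a.1 b.1, max a.1 b.1), (min a.2 b.2, max a.2 b.2))

-- Python loop `for i in range(-1, len(border)): … return False … return True` = .all over the range.
-- part2 only calls this with 2 ≤ border.length, so every pyGetD index is in range (Python never raises here).
def check_rec (pair : (Int × Int) × (Int × Int)) (border : List (Int × Int)) : Bool :=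
  let r := getrect pair.1 pair.2
  (PySem.List.pyRange (-1) (border.length : Int) 1).all fun i =>
    !(crossEdge r.1 r.2 (PySem.List.pyGetD border (i - 1) (0, 0)) (PySem.List.pyGetD border i (0, 0)))

def area (a b : Int × Int) : Int := (|a.1 - b.1| + 1) * (|a.2 - b.2| + 1)

def part2 (points : List (Int × Int)) : Int :=
  let pairs := points.flatMap fun a => (points.filter fun b => decide (a ≠ b)).map fun b => (a, b)
  pairs.foldl
    (fun max_area pr =>
      if area pr.1 pr.2 > max_area then
        if check_rec pr points then max (area pr.1 pr.2) max_area else max_area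
      else max_area)
    0

-- ===== PORT B =====
def area_alt (a b : Int × Int) : Int := (|a.1 - b.1| + 1) * (|a.2 - b.2| + 1)

def ok_alt (a b : Int × Int) (edges : List ((Int × Int) × (Int × Int))) : Bool :=
  let rx := (min a.1 b.1, max a.1 b.1)
  let ry := (min a.2 b.2, max a.2 b.2)
  edges.all fun e => !(crossEdge rx ry e.1 e.2)

def part2_alt (points : List (Int × Int)) : Int :=
  let edges := points.zip (points.drop 1 ++ points.take 1)   -- zip(points, points[1:] + points[:1])
  let pairs := points.flatMap fun a => (points.filter fun b => decide (a ≠ b)).map fun b => (a, b)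
  let s := PySem.List.sorted pairs (fun p => area_alt p.1 p.2) true
  match s.find? (fun p => ok_alt p.1 p.2 edges) with
  | some p => area_alt p.1 p.2
  | none => 0

-- ===== PRECONDITION & SPEC =====
def Spec_part2 (points : List (Int × Int)) (out : Int) : Prop := out = part2_alt points
instance (points : List (Int × Int)) (out : Int) : Decidable (Spec_part2 points out) := by unfold Spec_part2; infer_instance

-- ===== CLAIM (what is proved, stated in full; the proofs are below) =====
def Claim_equal_part2 : Prop := ∀ (points : List (Int × Int)), Dom_part2 points → Spec_part2 points (part2 points)

-- ===== LEMMAS AND PROOFS =====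

-- zipping a list against its rotation = consecutive pairs plus the wrap-around edge
lemma zip_rot {α : Type} (l : List α) (x : α) (h : l ≠ []) :
    l.zip (l.drop 1 ++ [x]) = l.zip (l.drop 1) ++ [(l.getLast h, x)] := by
  induction l with
  | nil => exact absurd rfl h
  | cons a t ih =>
    cases t with
    | nil => simp
    | cons b t' =>
      simp only [List.drop_succ_cons, List.drop_zero, List.cons_append, List.zip_cons_cons,
        List.getLast_cons (List.cons_ne_nil b t')]
      rw [show (b :: t').drop 1 = t' from rfl] at ih
      rw [ih (List.cons_ne_nil b t')]

-- indices 1 .. n-1 of A's loop produce exactly the consecutive pairs of the border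
lemma map_idx_zip {α : Type} [Inhabited α] (l : List α) (d : α) :
    (PySem.List.pyRange 1 (l.length : Int) 1).map
        (fun i => (PySem.List.pyGetD l (i - 1) d, PySem.List.pyGetD l i d))
      = l.zip (l.drop 1) := by
  apply List.ext_getElem
  · simp [PySem.List.length_pyRange_one]
  · intro k h1 h2
    have hk : k < l.length - 1 := by
      simpa [PySem.List.length_pyRange_one] using h1
    simp only [List.getElem_map, PySem.List.getElem_pyRange_one, List.getElem_zip,
      List.getElem_drop, Prod.mk.injEq]
    constructor
    · rw [show (1 : Int) + k - 1 = (k : Int) by ring,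
        PySem.List.pyGetD_eq_getElem l d (by positivity) (by exact_mod_cast by omega)]
      simp
    · rw [show (1 : Int) + k = ((k + 1 : Nat) : Int) by push_cast; ring,
        PySem.List.pyGetD_eq_getElem l d (by positivity) (by exact_mod_cast by omega)]
      congr 1
      omega

-- absorbing a conjunct that already occurs inside an `.all`
lemma all_absorb {α : Type} (p : α → Bool) (l : List α) (e : α) (he : e ∈ l) (b : Bool) :
    (p e && (b && l.all p)) = (l.all p && b) := by
  cases hl : l.all p with
  | false => simp
  | true =>
    have := (List.all_eq_true.mp hl) e he
    simp [this, Bool.and_comm]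

-- A's cyclic loop over indices range(-1, n) equals B's loop over zip(points, points[1:]+points[:1])
lemma all_cyclic (Q : (Int × Int) → (Int × Int) → Bool) (l : List (Int × Int))
    (h : 2 ≤ l.length) :
    ((PySem.List.pyRange (-1) (l.length : Int) 1).all fun i =>
        Q (PySem.List.pyGetD l (i - 1) (0, 0)) (PySem.List.pyGetD l i (0, 0)))
      = (l.zip (l.drop 1 ++ l.take 1)).all fun e => Q e.1 e.2 := by
  have hne : l ≠ [] := by intro hl; simp [hl] at h
  obtain ⟨x, t, rfl⟩ : ∃ x t, l = x :: t := by
    cases l with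
    | nil => exact absurd rfl hne
    | cons x t => exact ⟨x, t, rfl⟩
  set l := x :: t with hl
  have htake : l.take 1 = [x] := rfl
  have hhead : PySem.List.pyGetD l 0 ((0, 0) : Int × Int) = x := PySem.List.pyGetD_zero_cons x t ((0, 0) : Int × Int)
  have hlast : PySem.List.pyGetD l (-1) ((0, 0) : Int × Int) = l.getLast hne := PySem.List.pyGetD_neg_one l ((0, 0) : Int × Int) hne
  have hn2 : PySem.List.pyGetD l (-2) ((0, 0) : Int × Int) = l[l.length - 2] :=
    PySem.List.pyGetD_neg_ofNat l 2 ((0, 0) : Int × Int) (by omega) h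
  -- unfold the first two loop indices -1 and 0
  rw [PySem.List.pyRange_one_cons (by exact_mod_cast by omega),
      show (-1 : Int) + 1 = 0 by ring,
      PySem.List.pyRange_one_cons (by exact_mod_cast by omega),
      show (0 : Int) + 1 = 1 by ring]
  simp only [List.all_cons]
  rw [show (-1 : Int) - 1 = -2 by ring, show (0 : Int) - 1 = -1 by ring, hn2, hlast, hhead]
  -- the remaining indices are the consecutive pairs
  have htail : ((PySem.List.pyRange 1 (l.length : Int) 1).all fun i =>
      Q (PySem.List.pyGetD l (i - 1) (0, 0)) (PySem.List.pyGetD l i (0, 0)))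
      = (l.zip (l.drop 1)).all fun e => Q e.1 e.2 := by
    rw [← map_idx_zip l ((0, 0) : Int × Int), List.all_map]
    rfl
  rw [htail, htake, zip_rot l x hne, List.all_append]
  have hmem : (l[l.length - 2], l.getLast hne) ∈ l.zip (l.drop 1) := by
    have hlen : l.length - 2 < (l.zip (l.drop 1)).length := by
      simp only [List.length_zip, List.length_drop]
      omega
    have : (l.zip (l.drop 1))[l.length - 2]'hlen = (l[l.length - 2], l.getLast hne) := by
      simp only [List.getElem_zip, List.getElem_drop]
      rw [List.getLast_eq_getElem]
      congr 2
      omega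
    exact this ▸ List.getElem_mem hlen
  simpa using all_absorb (fun e => Q e.1 e.2) (l.zip (l.drop 1)) _ hmem (Q (l.getLast hne) x)

-- A's check_rec agrees with B's ok_alt on borders of length ≥ 2 (the only ones part2 reaches)
lemma check_eq_ok (a b : Int × Int) (l : List (Int × Int)) (h : 2 ≤ l.length) :
    check_rec (a, b) l = ok_alt a b (l.zip (l.drop 1 ++ l.take 1)) := by
  unfold check_rec ok_alt getrect
  exact all_cyclic (fun p1 p2 => !(crossEdge (min a.1 b.1, max a.1 b.1) (min a.2 b.2, max a.2 b.2) p1 p2)) l h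

-- A's pruned loop is the running maximum over the pairs that pass the check
lemma foldA {α : Type} (ck : α → Bool) (ar : α → Int) (l : List α) : ∀ m : Int,
    l.foldl (fun m p => if ar p > m then (if ck p then max (ar p) m else m) else m) m
      = (l.filter ck).foldl (fun m p => max m (ar p)) m := by
  induction l with
  | nil => intro m; rfl
  | cons a t ih =>
    intro m
    cases hc : ck a with
    | false =>
      simp only [List.foldl_cons, List.filter_cons, hc, if_neg (Bool.false_ne_true), ite_self]
      exact ih m
    | true =>
      have hstep : (if ar a > m then max (ar a) m else m) = max m (ar a) := by
        simp only [max_def]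
        split_ifs <;> omega
      simp only [List.foldl_cons, List.filter_cons, hc, if_true, hstep]
      exact ih (max m (ar a))

lemma fold_max_le {α : Type} (ar : α → Int) : ∀ (l : List α) (m : Int),
    (∀ p ∈ l, ar p ≤ m) → l.foldl (fun m p => max m (ar p)) m = m := by
  intro l
  induction l with
  | nil => intro m _; rfl
  | cons a t ih =>
    intro m hle
    simp only [List.foldl_cons, max_eq_left (hle a (List.mem_cons_self))]
    exact ih m fun p hp => hle p (List.mem_cons_of_mem a hp)

-- first hit in a descending list = running maximum over all hits
lemma find_sorted {α : Type} (ck : α → Bool) (ar : α → Int) : ∀ (s : List α),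
    s.Pairwise (fun p q => ar q ≤ ar p) → (∀ p ∈ s, 0 ≤ ar p) →
    (match s.find? ck with | some p => ar p | none => 0)
      = (s.filter ck).foldl (fun m p => max m (ar p)) 0 := by
  intro s
  induction s with
  | nil => intro _ _; rfl
  | cons a t ih =>
    intro hp hpos
    obtain ⟨ha, hp'⟩ := List.pairwise_cons.mp hp
    cases hc : ck a with
    | false =>
      rw [List.find?_cons_of_neg (by simp [hc])]
      simp only [List.filter_cons, hc, if_neg (Bool.false_ne_true)]
      exact ih hp' fun p hp => hpos p (List.mem_cons_of_mem a hp)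
    | true =>
      rw [List.find?_cons_of_pos hc]
      simp only [List.filter_cons, hc, if_true, List.foldl_cons,
        max_eq_right (hpos a List.mem_cons_self)]
      exact (fold_max_le ar _ _ fun p hp => ha p (List.mem_filter.mp hp).1).symm

lemma area_nonneg (a b : Int × Int) : 0 ≤ area_alt a b := by
  unfold area_alt
  positivity

-- sort-descending-and-take-first-hit = running maximum over all hits, for any pair list
lemma bridge {α : Type} (ck : α → Bool) (ar : α → Int) (pairs : List α) (pos : ∀ p, 0 ≤ ar p) :
    (match (PySem.List.sorted pairs ar true).find? ck with | some p => ar p | none => 0)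
      = (pairs.filter ck).foldl (fun m p => max m (ar p)) 0 := by
  have hpw := PySem.List.sorted_pairwise_rev pairs ar
  have hB := find_sorted ck ar _ hpw (fun p _ => pos p)
  haveI : RightCommutative (fun (m : Int) (p : α) => max m (ar p)) :=
    ⟨fun m p q => max_right_comm m (ar p) (ar q)⟩
  rw [hB]
  exact List.Perm.foldl_eq (f := fun m p => max m (ar p))
    ((PySem.List.sorted_perm pairs ar true).filter ck) 0

lemma two_le_length {α : Type} {l : List α} {a b : α} (ha : a ∈ l) (hb : b ∈ l) (hne : a ≠ b) :
    2 ≤ l.length := by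
  match l with
  | [] => simp at ha
  | [x] =>
    simp only [List.mem_singleton] at ha hb
    exact absurd (ha.trans hb.symm) hne
  | x :: y :: t => simp only [List.length_cons]; omega

-- ===== VERDICT (by name: the statement is the Claim_ definition above) =====
theorem part2_spec : Claim_equal_part2 := by
  intro points _
  simp only [Spec_part2, part2, part2_alt]
  set pairs := points.flatMap fun a => (points.filter fun b => decide (a ≠ b)).map fun b => (a, b) with hpairs
  set edges := points.zip (points.drop 1 ++ points.take 1) with hedges
  by_cases hnil : pairs = []
  · rw [hnil]
    have : PySem.List.sorted ([] : List ((Int × Int) × (Int × Int))) (fun p => area_alt p.1 p.2) true = [] :=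
      (PySem.List.sorted_eq_nil_iff _ _ _).mpr rfl
    simp [this]
  · -- pairs nonempty ⇒ points has two distinct elements ⇒ 2 ≤ points.length
    obtain ⟨pr, hpr⟩ := List.exists_mem_of_ne_nil pairs hnil
    have hlen : 2 ≤ points.length := by
      rw [hpairs] at hpr
      obtain ⟨a, hain, hb⟩ := List.mem_flatMap.mp hpr
      obtain ⟨b, hbin, rfl⟩ := List.mem_map.mp hb
      obtain ⟨hbin', hne⟩ := List.mem_filter.mp hbin
      exact two_le_length hain hbin' (of_decide_eq_true hne)
    obtain ⟨ck, hckdef⟩ :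
        ∃ ck, ck = fun p : ((Int × Int) × (Int × Int)) => ok_alt p.1 p.2 edges := ⟨_, rfl⟩
    have hck : ∀ p : (Int × Int) × (Int × Int), check_rec p points = ck p := by
      intro p
      simp only [hckdef]
      rw [hedges]
      exact check_eq_ok p.1 p.2 points hlen
    -- A side: running maximum over passing pairs
    have hA : pairs.foldl
        (fun max_area pr =>
          if area pr.1 pr.2 > max_area then
            if check_rec pr points then max (area pr.1 pr.2) max_area else max_area
          else max_area) 0
        = (pairs.filter ck).foldl (fun m p => max m (area_alt p.1 p.2)) 0 := by
      have h1 := foldA (fun p : (Int × Int) × (Int × Int) => check_rec p points)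
        (fun p => area p.1 p.2) pairs 0
      have harea' : area = area_alt := rfl
      rw [h1, List.filter_congr (fun p _ => hck p), harea']
    rw [hA, ← hckdef]
    have hbr := bridge ck (fun p => area_alt p.1 p.2) pairs (fun p => area_nonneg p.1 p.2)
    rcases hf : List.find? ck (PySem.List.sorted pairs (fun p => area_alt p.1 p.2) true) with _ | p
    · rw [hf] at hbr
      simpa using hbr.symm
    · rw [hf] at hbr
      simpa using hbr.symm
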